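-- pv_equiv track=rewrite | github.com/agahgok/transco | app/src/main/python/transcript_fetcher.py | _pick_lang
-- ===== SOURCE A (Python) =====
-- def _pick_lang(available_langs, preferred=("tr", "en")):
--     """
--     available_langs: iterable of language codes (e.g. ['en', 'en-GB', 'de', ...])
--     preferred: preference order; if none match, fallback to the first available
--     """
--     if not available_langs:
--         return None
--     langs = list(available_langs)
--
--     # exact match first
--     for p in preferred:
--         if p in langs:
--             return p
--
--     # prefix match (e.g. preferred 'en' matches 'en-GB', 'en-US')
--     for p in preferred:
--         for l in langs:
--             if l.startswith(p + "-"):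
--                 return l
--
--     # fallback: first available
--     return langs[0]
-- ===== SOURCE B (Python) =====
-- def _pick_lang(available_langs, preferred=("tr", "en")):
--     if not available_langs:
--         return None
--     langs = list(available_langs)
--     m = len(preferred)
--     n = len(langs)
--
--     # index the preference list once: first index of each exact code and of each 'code-' prefix
--     exact_j = {}
--     pfx_j = {}
--     for j, p in enumerate(preferred):
--         if p not in exact_j:
--             exact_j[p] = j
--         q = p + "-"
--         if q not in pfx_j:
--             pfx_j[q] = j
--
--     # numeric rank of a language: exact index < m + prefix index < 2*m
--     def rank(l):
--         r = exact_j.get(l)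
--         if r is not None:
--             return r
--         best = 2 * m
--         for d in range(len(l)):
--             if l[d] == "-":
--                 r = pfx_j.get(l[: d + 1])
--                 if r is not None and m + r < best:
--                     best = m + r
--         return best
--
--     return min(enumerate(langs), key=lambda t: rank(t[1]) * n + t[0])[1]
-- ===== Notes on version B (the rewrite author's own statement) =====
-- stated objective: alternative
-- what changed: A scans the preference list in three sequential early-return phases (exact membership, prefix via a nested loop over languages, fallback); B instead indexes the preference list once in two dictionaries (exact code -> first index, 'code-' prefix key -> first index), assigns each available language a single numeric rank (exact index < m + prefix index < 2m, position as tie-break), and returns min(enumerate(langs)) under that key.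
import Mathlib
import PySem

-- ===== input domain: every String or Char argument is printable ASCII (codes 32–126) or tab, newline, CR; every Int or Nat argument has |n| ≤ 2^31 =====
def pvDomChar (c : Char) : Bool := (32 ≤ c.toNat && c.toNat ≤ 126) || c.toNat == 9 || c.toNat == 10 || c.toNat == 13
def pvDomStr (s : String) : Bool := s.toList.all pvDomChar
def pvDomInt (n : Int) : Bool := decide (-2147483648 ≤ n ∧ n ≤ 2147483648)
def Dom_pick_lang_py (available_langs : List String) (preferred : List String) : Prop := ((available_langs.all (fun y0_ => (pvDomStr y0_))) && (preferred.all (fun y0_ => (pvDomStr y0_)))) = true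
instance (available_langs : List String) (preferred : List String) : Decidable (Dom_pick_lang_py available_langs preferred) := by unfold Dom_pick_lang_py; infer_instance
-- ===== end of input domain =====

-- B replaces A's three sequential early-return scans by a dictionary index of the preference list, a numeric rank per available language, and one min() pass; same return value on every input.


-- ===== PORT A =====
def pick_lang_py (available_langs : List String) (preferred : List String) : Option String :=
  if available_langs = [] then none
  else
    let langs := available_langs
    -- exact match first
    match preferred.find? (fun p => langs.contains p) with
    | some p => some p
    | none =>
      -- prefix match
      match preferred.findSome? (fun p => langs.find? (fun l => PySem.Str.startswith l (p ++ "-"))) with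
      | some l => some l
      | none => PySem.List.pyGet? langs 0  -- fallback: first available


-- ===== PORT B =====
-- the build loop of B: one pass over enumerate(preferred), recording the first index of
-- each exact code (ed) and of each "code-" prefix key (pd)
def pvBuild (ps : List (Int × String)) (ed pd : PySem.Dict String Int) :
    PySem.Dict String Int × PySem.Dict String Int :=
  match ps with
  | [] => (ed, pd)
  | (j, p) :: rest =>
      let ed' := if ed.contains p then ed else ed.insert p j
      let pd' := if pd.contains (p ++ "-") then pd else pd.insert (p ++ "-") j
      pvBuild rest ed' pd'

-- the 'for d in range(len(l))' scan of B's rank: try every dash position of l as a prefix key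
def pvRankGo (full : List Char) (pd : PySem.Dict String Int) (m : Int)
    (best : Int) (d : Nat) : List Char → Int
  | [] => best
  | c :: cs =>
      let best' :=
        if c = '-' then
          match pd.get? (String.ofList (full.take (d + 1))) with
          | some r => if m + r < best then m + r else best
          | none => best
        else best
      pvRankGo full pd m best' (d + 1) cs

-- B's rank(l): exact dictionary hit, else the best dash-prefix hit, else 2*m
def pvRank (ed pd : PySem.Dict String Int) (m : Int) (l : String) : Int :=
  match ed.get? l with
  | some r => r
  | none => pvRankGo l.toList pd m (2 * m) 0 l.toList

def pick_lang_py_alt (available_langs : List String) (preferred : List String) : Option String :=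
  if available_langs = [] then none
  else
    let langs := available_langs
    let m : Int := preferred.length
    let n : Int := langs.length
    let dicts := pvBuild (PySem.List.enumerate preferred 0) PySem.Dict.empty PySem.Dict.empty
    match PySem.List.min? (PySem.List.enumerate langs 0)
        (fun t => pvRank dicts.1 dicts.2 m t.2 * n + t.1) with
    | some t => some t.2
    | none => none

-- ===== PRECONDITION & SPEC =====
def Spec_pick_lang_py (available_langs : List String) (preferred : List String) (out : Option String) : Prop := out = pick_lang_py_alt available_langs preferred
instance (available_langs : List String) (preferred : List String) (out : Option String) : Decidable (Spec_pick_lang_py available_langs preferred out) := by unfold Spec_pick_lang_py; infer_instance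

-- ===== CLAIM (what is proved, stated in full; the proofs are below) =====
def Claim_equal_pick_lang_py : Prop := ∀ (available_langs : List String) (preferred : List String), Dom_pick_lang_py available_langs preferred → Spec_pick_lang_py available_langs preferred (pick_lang_py available_langs preferred)

-- ===== LEMMAS AND PROOFS =====

-- min? returns the element whose key is minimal, when that element is unique
theorem min?_eq_of_min {α : Type} (xs : List α) (key : α → Int) (c : α)
    (hc : c ∈ xs) (hmin : ∀ y ∈ xs, key c ≤ key y)
    (huniq : ∀ y ∈ xs, key y = key c → y = c) :
    PySem.List.min? xs key = some c := by
  cases h : PySem.List.min? xs key with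
  | none =>
    rw [PySem.List.min?_eq_none_iff] at h
    subst h; cases hc
  | some mm =>
    have hm := PySem.List.min?_mem h
    have h1 := PySem.List.min?_isMin h c hc
    have h2 := hmin mm hm
    exact congrArg some (huniq mm hm (le_antisymm h1 h2))

-- lexicographic comparison through the flattened key r * n + i
theorem key_le {r1 r2 i1 i2 n : Int} (hn : 0 < n)
    (hr : r1 < r2 ∨ (r1 = r2 ∧ i1 ≤ i2)) (hi1 : i1 < n) (hi2 : 0 ≤ i2) :
    r1 * n + i1 ≤ r2 * n + i2 := by
  rcases hr with h | ⟨rfl, h⟩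
  · nlinarith [mul_le_mul_of_nonneg_right (show r1 + 1 ≤ r2 by omega) (le_of_lt hn)]
  · omega

-- distinct positions give distinct keys: equality of keys forces equality of elements
theorem key_uniq (av : List String) (f : String → Int) (c y : Int × String)
    (hc : c ∈ PySem.List.enumerate av 0) (hy : y ∈ PySem.List.enumerate av 0)
    (h : f y.2 * (av.length : Int) + y.1 = f c.2 * (av.length : Int) + c.1) : y = c := by
  rw [PySem.List.mem_enumerate_iff] at hc hy
  obtain ⟨k, hk, rfl⟩ := hc
  obtain ⟨k', hk', rfl⟩ := hy
  simp only [zero_add] at h ⊢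
  set n : Int := (av.length : Int) with hn
  set r1 := f av[k'] with hr1
  set r2 := f av[k] with hr2
  have hkn : (k : Int) < n := by rw [hn]; exact_mod_cast hk
  have hk'n : (k' : Int) < n := by rw [hn]; exact_mod_cast hk'
  have hkeq : k' = k := by
    rcases lt_trichotomy r1 r2 with hlt | heq | hgt
    · nlinarith [mul_le_mul_of_nonneg_right (show r1 + 1 ≤ r2 by omega)
        (show (0:Int) ≤ n by omega)]
    · rw [heq] at h
      have : (k' : Int) = k := by omega
      exact_mod_cast this
    · nlinarith [mul_le_mul_of_nonneg_right (show r2 + 1 ≤ r1 by omega)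
        (show (0:Int) ≤ n by omega)]
  subst hkeq; rfl

-- decomposition of a successful findSome?
theorem findSome?_decomp {α β : Type} (f : α → Option β) (l : List α) (b : β)
    (h : l.findSome? f = some b) :
    ∃ pre x suf, l = pre ++ x :: suf ∧ f x = some b ∧ ∀ q ∈ pre, f q = none := by
  induction l with
  | nil => simp at h
  | cons a t ih =>
    rw [List.findSome?_cons] at h
    cases hfa : f a with
    | some v =>
      rw [hfa] at h
      refine ⟨[], a, t, by simp, ?_, by simp⟩
      rw [hfa]; exact h
    | none =>
      rw [hfa] at h
      obtain ⟨pre, x, suf, hl, hx, hpre⟩ := ih h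
      refine ⟨a :: pre, x, suf, by rw [hl]; rfl, hx, ?_⟩
      intro q hq
      rcases List.mem_cons.mp hq with rfl | hq
      · exact hfa
      · exact hpre q hq

-- the exact-code dictionary built by pvBuild: lookup = first matching index of the scan
theorem build_fst_get (ps : List (Int × String)) (ed pd : PySem.Dict String Int) (l : String) :
    ((pvBuild ps ed pd).1).get? l
      = (ed.get? l).or ((ps.find? (fun jp => jp.2 == l)).map Prod.fst) := by
  induction ps generalizing ed pd with
  | nil => simp [pvBuild]
  | cons jp rest ih =>
    obtain ⟨j, p⟩ := jp
    simp only [pvBuild]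
    rw [ih]
    by_cases hpq : p = l
    · subst hpq
      rw [List.find?_cons_of_pos (by simp)]
      by_cases hc : ed.contains p = true
      · rw [if_pos hc]
        have hs : (ed.get? p).isSome := by
          rw [← PySem.Dict.contains_eq_isSome_get?]; exact hc
        obtain ⟨v, hv⟩ := Option.isSome_iff_exists.mp hs
        simp [hv]
      · rw [if_neg hc]
        have hnone : ed.get? p = none := by
          have := PySem.Dict.contains_eq_isSome_get? ed p
          rw [Bool.not_eq_true] at hc
          rw [hc] at this
          exact Option.not_isSome_iff_eq_none.mp (by rw [← this]; simp)
        simp [hnone]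
    · rw [List.find?_cons_of_neg (by simp [hpq])]
      have hkeep : (if ed.contains p = true then ed else ed.insert p j).get? l = ed.get? l := by
        by_cases hc : ed.contains p = true
        · rw [if_pos hc]
        · rw [if_neg hc, PySem.Dict.get?_insert, if_neg (fun h => hpq h.symm)]
      rw [hkeep]

-- the prefix-key dictionary built by pvBuild: lookup = first matching index of the scan
theorem build_snd_get (ps : List (Int × String)) (ed pd : PySem.Dict String Int) (q : String) :
    ((pvBuild ps ed pd).2).get? q
      = (pd.get? q).or ((ps.find? (fun jp => jp.2 ++ "-" == q)).map Prod.fst) := by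
  induction ps generalizing ed pd with
  | nil => simp [pvBuild]
  | cons jp rest ih =>
    obtain ⟨j, p⟩ := jp
    simp only [pvBuild]
    rw [ih]
    by_cases hpq : p ++ "-" = q
    · rw [List.find?_cons_of_pos (by simp [hpq])]
      by_cases hc : pd.contains (p ++ "-") = true
      · rw [if_pos hc]
        have hs : (pd.get? q).isSome := by
          rw [← PySem.Dict.contains_eq_isSome_get?, ← hpq]; exact hc
        obtain ⟨v, hv⟩ := Option.isSome_iff_exists.mp hs
        simp [hv]
      · rw [if_neg hc]
        have hnone : pd.get? q = none := by
          have := PySem.Dict.contains_eq_isSome_get? pd (p ++ "-")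
          rw [Bool.not_eq_true] at hc
          rw [hc] at this
          rw [← hpq]
          exact Option.not_isSome_iff_eq_none.mp (by rw [← this]; simp)
        rw [hpq]
        simp [hnone]
    · rw [List.find?_cons_of_neg (by simp [hpq])]
      have hkeep : (if pd.contains (p ++ "-") = true then pd else pd.insert (p ++ "-") j).get? q
          = pd.get? q := by
        by_cases hc : pd.contains (p ++ "-") = true
        · rw [if_pos hc]
        · rw [if_neg hc, PySem.Dict.get?_insert, if_neg (fun h => hpq h.symm)]
      rw [hkeep]

-- the scan over enumerate(preferred) with an exact-equality test is index?
theorem enum_find_exact (pref : List String) (s : Int) (l : String) :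
    ((PySem.List.enumerate pref s).find? (fun jp => jp.2 == l)).map Prod.fst
      = (PySem.List.index? pref l).map (fun k => s + (k : Int)) := by
  induction pref generalizing s with
  | nil => simp [PySem.List.enumerate_nil]
  | cons p rest ih =>
    rw [PySem.List.enumerate_cons]
    by_cases hpl : p = l
    · subst hpl
      rw [List.find?_cons_of_pos (by simp), PySem.List.index?_cons_self]
      simp
    · rw [List.find?_cons_of_neg (by simp [hpl]), ih (s + 1),
        PySem.List.index?_cons_of_ne _ hpl]
      cases PySem.List.index? rest l with
      | none => simp
      | some k =>
        simp
        omega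

-- the scan over enumerate(preferred) with the prefix-key test: none, or the first match
theorem enum_find_pfx_spec (pref : List String) (s : Int) (q : String) :
    ((PySem.List.enumerate pref s).find? (fun jp => jp.2 ++ "-" == q) = none
        ∧ ∀ p ∈ pref, ¬ p ++ "-" = q)
    ∨ ∃ (k : Nat) (hk : k < pref.length),
        (PySem.List.enumerate pref s).find? (fun jp => jp.2 ++ "-" == q)
            = some (s + (k : Int), pref[k])
        ∧ pref[k] ++ "-" = q ∧ ∀ (k' : Nat), k' < k → ¬ (pref[k']! ++ "-" = q) := by
  induction pref generalizing s with
  | nil => left; simp [PySem.List.enumerate_nil]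
  | cons p rest ih =>
    rw [PySem.List.enumerate_cons]
    by_cases hpq : p ++ "-" = q
    · right
      refine ⟨0, by simp, ?_, by simpa using hpq, by omega⟩
      rw [List.find?_cons_of_pos (by simp [hpq])]
      simp
    · rcases ih (s + 1) with ⟨hnone, hall⟩ | ⟨k, hk, hfd, heq, hbef⟩
      · left
        refine ⟨?_, ?_⟩
        · rw [List.find?_cons_of_neg (by simp [hpq])]
          exact hnone
        · intro x hx
          rcases List.mem_cons.mp hx with rfl | hx
          · exact hpq
          · exact hall x hx
      · right
        refine ⟨k + 1, by simpa using Nat.succ_lt_succ hk, ?_, by simpa using heq, ?_⟩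
        · rw [List.find?_cons_of_neg (by simp [hpq]), hfd]
          congr 2
          push_cast
          ring
        · intro k' hk'
          cases k' with
          | zero => simpa using hpq
          | succ k'' =>
            have := hbef k'' (by omega)
            simpa using this

-- Python startswith against 'code-' as a list-prefix statement
theorem sw_iff (l p : String) :
    PySem.Str.startswith l (p ++ "-") = true ↔ (p.toList ++ ['-']) <+: l.toList := by
  rw [PySem.Str.startswith_eq]
  rw [show (p ++ "-").toList = p.toList ++ ['-'] by simp]
  exact PySem.Chars.startswith_iff _ _

-- reduce the option-match step of the scan under a known lookup
theorem rankStep_some (pd : PySem.Dict String Int) (q : String) (m best r : Int)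
    (h : pd.get? q = some r) :
    (match pd.get? q with
     | some r => if m + r < best then m + r else best
     | none => best) = if m + r < best then m + r else best := by
  rw [h]

theorem rankStep_none (pd : PySem.Dict String Int) (q : String) (m best : Int)
    (h : pd.get? q = none) :
    (match pd.get? q with
     | some r => if m + r < best then m + r else best
     | none => best) = best := by
  rw [h]

-- characterisation of the dash-position scan: a running minimum over the prefix-dictionary hits
theorem rankGo_spec (full : List Char) (pd : PySem.Dict String Int) (m : Int) :
    ∀ (rest : List Char) (d : Nat) (best : Int), full.drop d = rest →
      pvRankGo full pd m best d rest ≤ best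
      ∧ (∀ (d' : Nat) (h : d' < full.length), d ≤ d' → full[d'] = '-' →
          ∀ r, pd.get? (String.ofList (full.take (d' + 1))) = some r →
            pvRankGo full pd m best d rest ≤ m + r)
      ∧ (pvRankGo full pd m best d rest = best ∨
          ∃ (d' : Nat) (h : d' < full.length), d ≤ d' ∧ full[d'] = '-' ∧
            pd.get? (String.ofList (full.take (d' + 1)))
              = some (pvRankGo full pd m best d rest - m)) := by
  intro rest
  induction rest with
  | nil =>
    intro d best hdrop
    have hdl : full.length ≤ d := by
      by_contra hlt
      push Not at hlt
      have : full.drop d ≠ [] := by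
        simp [List.drop_eq_nil_iff]
        omega
      exact this hdrop
    refine ⟨le_refl _, ?_, Or.inl rfl⟩
    intro d' h hd' _
    omega
  | cons c cs ih =>
    intro d best hdrop
    have hc0 : full[d]? = some c := by
      have := congrArg (fun t => t[0]?) hdrop
      simpa [List.getElem?_drop] using this
    have hd : d < full.length := (List.getElem?_eq_some_iff.mp hc0).1
    have hcd : full[d] = c := by
      have := List.getElem?_eq_getElem hd
      rw [hc0] at this
      exact (Option.some_injective _ this.symm)
    have hdrop1 : full.drop (d + 1) = cs := by
      have := congrArg List.tail hdrop
      simpa [List.tail_drop] using this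
    -- the new running best after processing position d
    set best' :=
      (if c = '-' then
        match pd.get? (String.ofList (full.take (d + 1))) with
        | some r => if m + r < best then m + r else best
        | none => best
      else best) with hbest'
    have hrun : pvRankGo full pd m best d (c :: cs) = pvRankGo full pd m best' (d + 1) cs := by
      rw [pvRankGo]
    have hb'le : best' ≤ best := by
      rw [hbest']
      by_cases hcd' : c = '-'
      · rw [if_pos hcd']
        cases hg : pd.get? (String.ofList (full.take (d + 1))) with
        | some r =>
          dsimp only
          split
          · rename_i hlt
            exact le_of_lt hlt
          · exact le_rfl
        | none => exact le_rfl
      · rw [if_neg hcd']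
    obtain ⟨ihle, ihcand, ihmem⟩ := ih (d + 1) best' hdrop1
    refine ⟨?_, ?_, ?_⟩
    · rw [hrun]; exact le_trans ihle hb'le
    · intro d' h hd' hdash r hget
      rcases Nat.eq_or_lt_of_le hd' with heq | hlt
      · -- the candidate sits at position d itself
        subst heq
        rw [hrun]
        have hcdash : c = '-' := by rw [← hcd]; exact hdash
        have : best' ≤ m + r := by
          rw [hbest', if_pos hcdash, rankStep_some _ _ _ _ _ hget]
          split
          · exact le_rfl
          · rename_i hnl
            exact not_lt.mp hnl
        exact le_trans ihle this
      · rw [hrun]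
        exact ihcand d' h hlt hdash r hget
    · rw [hrun]
      rcases ihmem with hbe | ⟨d', h, hd', hdash, hget⟩
      · -- the tail returned best': look at how best' was formed
        by_cases hcdash : c = '-'
        · cases hget0 : pd.get? (String.ofList (full.take (d + 1))) with
          | some r =>
            by_cases hless : m + r < best
            · right
              refine ⟨d, hd, le_refl _, by rw [hcd]; exact hcdash, ?_⟩
              rw [hget0, hbe, hbest', if_pos hcdash, rankStep_some _ _ _ _ _ hget0, if_pos hless]
              congr 1
              omega
            · left
              rw [hbe, hbest', if_pos hcdash, rankStep_some _ _ _ _ _ hget0, if_neg hless]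
          | none =>
            left
            rw [hbe, hbest', if_pos hcdash, rankStep_none _ _ _ _ hget0]
        · left
          rw [hbe, hbest', if_neg hcdash]
      · right
        exact ⟨d', h, by omega, hdash, hget⟩

-- rank of a language that occurs in preferred is its first index there
theorem pvRank_of_mem (pref : List String) (m : Int) (l : String) (k : Nat)
    (hidx : PySem.List.index? pref l = some k) :
    pvRank (pvBuild (PySem.List.enumerate pref 0) PySem.Dict.empty PySem.Dict.empty).1
        (pvBuild (PySem.List.enumerate pref 0) PySem.Dict.empty PySem.Dict.empty).2 m l
      = (k : Int) := by
  have hed : (pvBuild (PySem.List.enumerate pref 0) PySem.Dict.empty PySem.Dict.empty).1.get? l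
      = some (k : Int) := by
    rw [build_fst_get, PySem.Dict.get?_empty, Option.none_or, enum_find_exact, hidx]
    simp
  unfold pvRank
  rw [hed]

-- a prefix-dictionary hit names a genuine prefix match in preferred
theorem cand_match (pref : List String) (L : List Char) (d : Nat)
    (_hd : d < L.length) (r : Int)
    (hget : (pvBuild (PySem.List.enumerate pref 0) PySem.Dict.empty PySem.Dict.empty).2.get?
        (String.ofList (L.take (d + 1))) = some r) :
    ∃ (k : Nat) (hk : k < pref.length), r = (k : Int)
      ∧ pref[k] ++ "-" = String.ofList (L.take (d + 1))
      ∧ ∀ (k' : Nat), k' < k → ¬ (pref[k']! ++ "-" = String.ofList (L.take (d + 1))) := by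
  rw [build_snd_get, PySem.Dict.get?_empty, Option.none_or] at hget
  rcases enum_find_pfx_spec pref 0 (String.ofList (L.take (d + 1))) with ⟨hnone, _⟩ | ⟨k, hk, hfd, heq, hbef⟩
  · rw [hnone] at hget
    simp at hget
  · rw [hfd] at hget
    simp only [Option.map_some] at hget
    refine ⟨k, hk, ?_, heq, hbef⟩
    have := Option.some_injective _ hget
    omega

-- rank of a language NOT in preferred: 2*m when nothing prefix-matches, else m + first match index
theorem pvRank_spec_notmem (pref : List String) (l : String) (hl : l ∉ pref) :
    (pvRank (pvBuild (PySem.List.enumerate pref 0) PySem.Dict.empty PySem.Dict.empty).1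
          (pvBuild (PySem.List.enumerate pref 0) PySem.Dict.empty PySem.Dict.empty).2
          (pref.length : Int) l
        = 2 * (pref.length : Int)
      ∧ ∀ p ∈ pref, ¬ PySem.Str.startswith l (p ++ "-") = true)
    ∨ ∃ (k : Nat) (hk : k < pref.length),
        pvRank (pvBuild (PySem.List.enumerate pref 0) PySem.Dict.empty PySem.Dict.empty).1
            (pvBuild (PySem.List.enumerate pref 0) PySem.Dict.empty PySem.Dict.empty).2
            (pref.length : Int) l
          = (pref.length : Int) + (k : Int)
        ∧ PySem.Str.startswith l (pref[k] ++ "-") = true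
        ∧ ∀ (k' : Nat), k' < k → ¬ PySem.Str.startswith l (pref[k']! ++ "-") = true := by
  set m : Int := (pref.length : Int) with hm
  set pd := (pvBuild (PySem.List.enumerate pref 0) PySem.Dict.empty PySem.Dict.empty).2 with hpd
  have hedl : (pvBuild (PySem.List.enumerate pref 0) PySem.Dict.empty PySem.Dict.empty).1.get? l = none := by
    rw [build_fst_get, PySem.Dict.get?_empty, Option.none_or, enum_find_exact]
    rw [(PySem.List.index?_eq_none_iff pref l).mpr hl]
    rfl
  have hrank : pvRank (pvBuild (PySem.List.enumerate pref 0) PySem.Dict.empty PySem.Dict.empty).1 pd m l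
      = pvRankGo l.toList pd m (2 * m) 0 l.toList := by
    unfold pvRank
    rw [hedl]
  set L := l.toList with hL
  obtain ⟨hle, hcand, hmem⟩ := rankGo_spec L pd m L 0 (2 * m) (by simp)
  -- every dash-scan hit is a genuine prefix match
  have hhit : ∀ (d' : Nat) (h : d' < L.length), L[d'] = '-' →
      ∀ r, pd.get? (String.ofList (L.take (d' + 1))) = some r →
        ∃ (k : Nat) (hk : k < pref.length), r = (k : Int)
          ∧ PySem.Str.startswith l (pref[k] ++ "-") = true := by
    intro d' h hdash r hget
    obtain ⟨k, hk, hrkk, heq, _⟩ := cand_match pref L d' h r (by rw [← hpd]; exact hget)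
    refine ⟨k, hk, hrkk, ?_⟩
    rw [sw_iff]
    have htl : pref[k].toList ++ ['-'] = L.take (d' + 1) := by
      have := congrArg String.toList heq
      simpa using this
    rw [htl]
    exact List.take_prefix _ _
  by_cases hM : ∃ k : Nat, k < pref.length ∧ PySem.Str.startswith l (pref[k]! ++ "-") = true
  · -- some preferred entry prefix-matches: the scan returns m + (the first such index)
    right
    set k0 := Nat.find hM with hk0
    obtain ⟨hk0len, hk0sw⟩ := Nat.find_spec hM
    have hk0min : ∀ k' : Nat, k' < k0 → ¬ (k' < pref.length ∧ PySem.Str.startswith l (pref[k']! ++ "-") = true) :=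
      fun k' hk' => Nat.find_min hM hk'
    have hgetk0 : pref[k0]! = pref[k0]'hk0len := by
      rw [List.getElem!_eq_getElem?_getD, List.getElem?_eq_getElem hk0len]
      rfl
    rw [hgetk0] at hk0sw
    -- locate the dash position that realises the first match
    have hpfx : (pref[k0].toList ++ ['-']) <+: L := (sw_iff l _).mp hk0sw
    set d0 : Nat := pref[k0].toList.length with hd0
    have hlen1 : d0 + 1 = (pref[k0].toList ++ ['-']).length := by simp [hd0]
    have hd0len : d0 < L.length := by
      have := hpfx.length_le
      simp [hd0] at this ⊢
      omega
    have htake : L.take (d0 + 1) = pref[k0].toList ++ ['-'] := by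
      have := List.prefix_iff_eq_take.mp hpfx
      rw [hlen1]
      exact this.symm
    have hdash? : L[d0]? = some '-' := by
      obtain ⟨t, ht⟩ := hpfx
      rw [← ht, List.getElem?_append_left (by simp [hd0]),
        List.getElem?_append_right (by simp [hd0])]
      simp [hd0]
    have hdash : L[d0] = '-' := by
      have h2 := List.getElem?_eq_getElem hd0len
      rw [hdash?] at h2
      exact (Option.some_injective _ h2.symm)
    have hq0 : String.ofList (L.take (d0 + 1)) = pref[k0] ++ "-" := by
      rw [htake]
      apply String.toList_injective ?_
      simp
    -- the dictionary holds exactly k0 at that key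
    have hgetq0 : pd.get? (String.ofList (L.take (d0 + 1))) = some (k0 : Int) := by
      rw [hq0]
      rw [hpd, build_snd_get, PySem.Dict.get?_empty, Option.none_or]
      rcases enum_find_pfx_spec pref 0 (pref[k0] ++ "-") with ⟨_, hall⟩ | ⟨k, hk, hfd, heq, hbef⟩
      · exact absurd rfl (hall pref[k0] (List.getElem_mem hk0len))
      · rw [hfd]
        simp only [Option.map_some]
        congr 1
        have hkk0 : k = k0 := by
          have hge : k0 ≤ k := by
            by_contra hlt
            push Not at hlt
            have hk0get : pref[k]! = pref[k]'hk := by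
              rw [List.getElem!_eq_getElem?_getD, List.getElem?_eq_getElem hk]
              rfl
            refine hk0min k hlt ⟨hk, ?_⟩
            rw [hk0get]
            rw [sw_iff]
            have : pref[k].toList ++ ['-'] = pref[k0].toList ++ ['-'] := by
              have := congrArg String.toList heq
              simpa using this
            rw [this]
            exact hpfx
          have hle2 : k ≤ k0 := by
            by_contra hgt
            push Not at hgt
            have hk0bang : pref[k0]! = pref[k0]'hk0len := hgetk0
            exact hbef k0 hgt (by rw [hk0bang])
          omega
        rw [hkk0]
        omega
    have hrle : pvRankGo L pd m (2 * m) 0 L ≤ m + (k0 : Int) :=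
      hcand d0 hd0len (Nat.zero_le _) hdash (k0 : Int) hgetq0
    -- and every value the scan can return is at least m + k0
    have hval : pvRankGo L pd m (2 * m) 0 L = m + (k0 : Int) := by
      rcases hmem with hbe | ⟨d', h, _, hdash', hget'⟩
      · -- = 2*m is impossible: 2*m > m + k0 ≥ the result
        have : (k0 : Int) < m := by rw [hm]; exact_mod_cast hk0len
        omega
      · obtain ⟨k, hk, hrkk, hswk⟩ := hhit d' h hdash' _ hget'
        have hge : k0 ≤ k := by
          by_contra hlt
          push Not at hlt
          have hkget : pref[k]! = pref[k]'hk := by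
            rw [List.getElem!_eq_getElem?_getD, List.getElem?_eq_getElem hk]
            rfl
          exact hk0min k hlt ⟨hk, by rw [hkget]; exact hswk⟩
        have : (k0 : Int) ≤ (k : Int) := by exact_mod_cast hge
        omega
    refine ⟨k0, hk0len, ?_, hk0sw, ?_⟩
    · rw [hrank, hval]
    · intro k' hk' hsw
      exact hk0min k' hk' ⟨by omega, hsw⟩
  · -- nothing prefix-matches: the scan keeps its initial 2*m
    left
    push Not at hM
    have hnocand : pvRankGo L pd m (2 * m) 0 L = 2 * m := by
      rcases hmem with hbe | ⟨d', h, _, hdash', hget'⟩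
      · exact hbe
      · obtain ⟨k, hk, _, hswk⟩ := hhit d' h hdash' _ hget'
        have hkget : pref[k]! = pref[k]'hk := by
          rw [List.getElem!_eq_getElem?_getD, List.getElem?_eq_getElem hk]
          rfl
        have hswbang : PySem.Str.startswith l (pref[k]! ++ "-") = true := by
          rw [hkget]; exact hswk
        exact absurd hswbang (by simpa using hM k hk)
    refine ⟨by rw [hrank, hnocand], ?_⟩
    intro p hp hsw
    obtain ⟨k, hk, rfl⟩ := List.mem_iff_getElem.mp hp
    have hkget : pref[k]! = pref[k]'hk := by
      rw [List.getElem!_eq_getElem?_getD, List.getElem?_eq_getElem hk]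
      rfl
    have hswbang : PySem.Str.startswith l (pref[k]! ++ "-") = true := by
      rw [hkget]; exact hsw
    exact absurd hswbang (by simpa using hM k hk)

-- a language not in preferred never ranks below m
theorem pvRank_ge_of_notmem (pref : List String) (l : String) (hl : l ∉ pref) :
    (pref.length : Int) ≤
      pvRank (pvBuild (PySem.List.enumerate pref 0) PySem.Dict.empty PySem.Dict.empty).1
        (pvBuild (PySem.List.enumerate pref 0) PySem.Dict.empty PySem.Dict.empty).2
        (pref.length : Int) l := by
  rcases pvRank_spec_notmem pref l hl with ⟨hval, _⟩ | ⟨k, hk, hval, _, _⟩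
  · rw [hval]
    have h0 : (0:Int) ≤ (pref.length : Int) := Int.natCast_nonneg _
    omega
  · rw [hval]
    have : (0:Int) ≤ (k : Int) := Int.natCast_nonneg _
    omega

theorem pick_eq (av pref : List String) : pick_lang_py av pref = pick_lang_py_alt av pref := by
  by_cases hav : av = []
  · subst hav; rfl
  unfold pick_lang_py pick_lang_py_alt
  rw [if_neg hav, if_neg hav]
  set m : Int := (pref.length : Int) with hm
  set n : Int := (av.length : Int) with hn
  have hn0 : 0 < n := by
    rw [hn]
    exact_mod_cast List.length_pos_iff.mpr hav
  have hm0 : 0 ≤ m := by rw [hm]; exact Int.natCast_nonneg _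
  set D := pvBuild (PySem.List.enumerate pref 0) PySem.Dict.empty PySem.Dict.empty with hD
  show (match List.find? (fun p => av.contains p) pref with
        | some p => some p
        | none =>
          match List.findSome? (fun p => List.find? (fun l => PySem.Str.startswith l (p ++ "-")) av) pref with
          | some l => some l
          | none => PySem.List.pyGet? av 0) =
       (match PySem.List.min? (PySem.List.enumerate av 0) (fun t => pvRank D.1 D.2 m t.2 * n + t.1) with
        | some t => some t.2
        | none => none)
  have hmemE : ∀ (k : Nat) (hk : k < av.length), ((k : Int), av[k]) ∈ PySem.List.enumerate av 0 :=
    fun k hk => (PySem.List.mem_enumerate_iff av 0 _).mpr ⟨k, hk, by simp⟩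
  have hminlem : ∀ (i0 : Nat) (hi0 : i0 < av.length),
      (∀ y ∈ PySem.List.enumerate av 0,
        pvRank D.1 D.2 m av[i0] * n + (i0 : Int) ≤ pvRank D.1 D.2 m y.2 * n + y.1) →
      PySem.List.min? (PySem.List.enumerate av 0) (fun t => pvRank D.1 D.2 m t.2 * n + t.1)
        = some ((i0 : Int), av[i0]) := by
    intro i0 hi0 hmin
    refine min?_eq_of_min _ _ _ (hmemE i0 hi0) hmin ?_
    intro y hy h
    exact key_uniq av (fun s => pvRank D.1 D.2 m s) _ y (hmemE i0 hi0) hy h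
  have hrank_mem : ∀ (l : String) (k : Nat), PySem.List.index? pref l = some k →
      pvRank D.1 D.2 m l = (k : Int) := by
    intro l k hidx
    have h := pvRank_of_mem pref m l k hidx
    rw [← hD] at h
    exact h
  have hge_notmem : ∀ l, l ∉ pref → m ≤ pvRank D.1 D.2 m l := by
    intro l hl
    have h := pvRank_ge_of_notmem pref l hl
    rw [← hm, ← hD] at h
    exact h
  have hspec_notmem : ∀ l, l ∉ pref →
      (pvRank D.1 D.2 m l = 2 * m ∧ ∀ p ∈ pref, ¬ PySem.Str.startswith l (p ++ "-") = true)
      ∨ ∃ (k : Nat) (hk : k < pref.length), pvRank D.1 D.2 m l = m + (k : Int)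
          ∧ PySem.Str.startswith l (pref[k] ++ "-") = true
          ∧ ∀ (k' : Nat), k' < k → ¬ PySem.Str.startswith l (pref[k']! ++ "-") = true := by
    intro l hl
    have h := pvRank_spec_notmem pref l hl
    rw [← hm, ← hD] at h
    exact h
  cases hfind : List.find? (fun p => av.contains p) pref with
  | some p =>
    -- CASE I: exact match; A returns the first preferred language present in av
    obtain ⟨hp, pre, suf, hpref, hprenc⟩ := List.find?_eq_some_iff_append.mp hfind
    have hpmem : p ∈ av := by simpa using hp
    have hpnotpre : p ∉ pre := by
      intro hmem
      have h2 := hprenc p hmem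
      simp at h2
      exact h2 hpmem
    have hidxp : PySem.List.index? pref p = some pre.length :=
      (PySem.List.index?_eq_some_iff pref p pre.length).mpr ⟨pre, suf, hpref, rfl, hpnotpre⟩
    have hrankp : pvRank D.1 D.2 m p = (pre.length : Int) := hrank_mem p _ hidxp
    obtain ⟨i0, hidxav⟩ := Option.isSome_iff_exists.mp ((PySem.List.index?_isSome_iff av p).mpr hpmem)
    obtain ⟨hi0, havi0, hfirst⟩ := PySem.List.getElem_of_index?_eq_some hidxav
    have hj0m : (pre.length : Int) < m := by
      rw [hm]
      simp only [hpref, List.length_append, List.length_cons]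
      push_cast
      omega
    have hmin : ∀ y ∈ PySem.List.enumerate av 0,
        pvRank D.1 D.2 m av[i0] * n + (i0 : Int) ≤ pvRank D.1 D.2 m y.2 * n + y.1 := by
      intro y hy
      obtain ⟨k, hk, rfl⟩ := (PySem.List.mem_enumerate_iff av 0 y).mp hy
      simp only [zero_add]
      rw [havi0, hrankp]
      refine key_le hn0 ?_ (by rw [hn]; exact_mod_cast hi0) (Int.natCast_nonneg _)
      by_cases hcon : av[k] ∈ pref
      · obtain ⟨jk, hidxk⟩ :=
          Option.isSome_iff_exists.mp ((PySem.List.index?_isSome_iff pref av[k]).mpr hcon)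
        have hrk : pvRank D.1 D.2 m av[k] = (jk : Int) := hrank_mem _ _ hidxk
        obtain ⟨hjk, hprefjk, hjkfirst⟩ := PySem.List.getElem_of_index?_eq_some hidxk
        have hjkge : pre.length ≤ jk := by
          by_contra hlt
          push Not at hlt
          have e1 : pref[jk]'hjk = pre[jk]'hlt := by
            simp only [hpref]
            exact List.getElem_append_left hlt
          have hmempre : av[k] ∈ pre := by
            rw [← hprefjk, e1]
            exact List.getElem_mem _
          have h3 := hprenc _ hmempre
          simp at h3
        rcases Nat.eq_or_lt_of_le hjkge with heq | hlt
        · -- same rank: av[k] = p, so position decides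
          subst heq
          have havkp : av[k] = p := by
            rw [← hprefjk]
            simp [hpref]
          right
          constructor
          · rw [hrk]
          · have : i0 ≤ k := by
              by_contra hki
              push Not at hki
              exact hfirst k hki havkp
            exact_mod_cast this
        · left
          rw [hrk]
          exact_mod_cast hlt
      · left
        have hge := hge_notmem av[k] hcon
        omega
    rw [hminlem i0 hi0 hmin]
    simp only [havi0]
  | none =>
    have hnoexact : ∀ q ∈ pref, ¬ av.contains q = true := by
      intro q hq
      have h := List.find?_eq_none.mp hfind q hq
      simpa using h
    have hnotinpref : ∀ l ∈ av, l ∉ pref := by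
      intro l hl hlp
      have h := hnoexact l hlp
      simp at h
      exact h hl
    cases hsome : List.findSome? (fun p => List.find? (fun l => PySem.Str.startswith l (p ++ "-")) av) pref with
    | some lstar =>
      -- CASE II: prefix match
      obtain ⟨pre, p0, suf, hpref, hfp0, hprenone⟩ := findSome?_decomp _ _ _ hsome
      obtain ⟨hswstar, lpre, lsuf, hav2, hlprensw⟩ := List.find?_eq_some_iff_append.mp hfp0
      have hprefp0 : pref[pre.length]'(by rw [hpref]; simp) = p0 := by simp [hpref]
      have havistar : av[lpre.length]'(by rw [hav2]; simp) = lstar := by simp [hav2]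
      have histar : lpre.length < av.length := by rw [hav2]; simp
      have hj0m : (pre.length : Int) < m := by
        rw [hm]
        simp only [hpref, List.length_append, List.length_cons]
        push_cast
        omega
      -- no language prefix-matches a preferred entry strictly before p0
      have hnoswpre : ∀ (j : Nat) (hj : j < pre.length), ∀ l ∈ av,
          ¬ PySem.Str.startswith l (pref[j]'(by rw [hpref]; simp; omega) ++ "-") = true := by
        intro j hj l hl
        have e1 : pref[j]'(by rw [hpref]; simp; omega) = pre[j]'hj := by
          simp only [hpref]
          exact List.getElem_append_left hj
        rw [e1]
        have h := hprenone _ (List.getElem_mem hj)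
        have hnone := List.find?_eq_none.mp h l hl
        simpa using hnone
      have hlstarmem : lstar ∈ av := by rw [hav2]; simp
      have hrankstar : pvRank D.1 D.2 m lstar = m + (pre.length : Int) := by
        rcases hspec_notmem lstar (hnotinpref lstar hlstarmem) with ⟨_, hall⟩ | ⟨k, hk, hval, hswk, hbefore⟩
        · exact absurd hswstar (hall p0 (by rw [hpref]; simp))
        · have hkge : pre.length ≤ k := by
            by_contra hlt
            push Not at hlt
            exact hnoswpre k hlt lstar hlstarmem hswk
          have hkle : k ≤ pre.length := by
            by_contra hgt
            push Not at hgt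
            have hbang : pref[pre.length]! = pref[pre.length]'(by rw [hpref]; simp) := by
              rw [List.getElem!_eq_getElem?_getD, List.getElem?_eq_getElem (by rw [hpref]; simp)]
              rfl
            have h := hbefore pre.length hgt
            rw [hbang, hprefp0] at h
            exact h hswstar
          have hkeq : k = pre.length := le_antisymm hkle hkge
          rw [hval, hkeq]
      have hmin : ∀ y ∈ PySem.List.enumerate av 0,
          pvRank D.1 D.2 m av[lpre.length] * n + ((lpre.length : Nat) : Int)
            ≤ pvRank D.1 D.2 m y.2 * n + y.1 := by
        intro y hy
        obtain ⟨k, hk, rfl⟩ := (PySem.List.mem_enumerate_iff av 0 y).mp hy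
        simp only [zero_add]
        rw [havistar, hrankstar]
        refine key_le hn0 ?_ (by rw [hn]; exact_mod_cast histar) (Int.natCast_nonneg _)
        rcases hspec_notmem av[k] (hnotinpref av[k] (List.getElem_mem hk)) with ⟨hval, _⟩ | ⟨kk, hkk, hval, hswkk, hbefore⟩
        · left
          rw [hval]
          omega
        · have hkkge : pre.length ≤ kk := by
            by_contra hlt
            push Not at hlt
            exact hnoswpre kk hlt av[k] (List.getElem_mem hk) hswkk
          rcases Nat.eq_or_lt_of_le hkkge with heq | hlt
          · -- same preferred entry: position in av decides
            right
            subst heq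
            constructor
            · rw [hval]
            · have hswk0 : PySem.Str.startswith av[k] (p0 ++ "-") = true := by
                rw [← hprefp0]
                exact hswkk
              have hposk : lpre.length ≤ k := by
                by_contra hki
                push Not at hki
                have e1 : av[k] = lpre[k]'hki := by
                  simp only [hav2]
                  exact List.getElem_append_left hki
                have h4 := hlprensw _ (List.getElem_mem hki)
                rw [← e1] at h4
                simp at h4
                simp at hswk0
                rw [hswk0] at h4
                simp at h4
              exact_mod_cast hposk
          · left
            rw [hval]
            have hc : (pre.length : Int) < (kk : Int) := by exact_mod_cast hlt
            omega
      rw [hminlem lpre.length histar hmin]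
      simp only [havistar]
    | none =>
      -- CASE III: fallback to the first available language; every rank is 2*m
      have hnosw : ∀ l ∈ av, ∀ q ∈ pref, ¬ PySem.Str.startswith l (q ++ "-") = true := by
        intro l hl q hq
        have h := List.find?_eq_none.mp (List.findSome?_eq_none_iff.mp hsome q hq) l hl
        simpa using h
      have hrankall : ∀ l ∈ av, pvRank D.1 D.2 m l = 2 * m := by
        intro l hl
        rcases hspec_notmem l (hnotinpref l hl) with ⟨hval, _⟩ | ⟨k, hk, _, hswk, _⟩
        · exact hval
        · exact absurd hswk (hnosw l hl pref[k] (List.getElem_mem hk))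
      have h0 : 0 < av.length := List.length_pos_iff.mpr hav
      have hmin : ∀ y ∈ PySem.List.enumerate av 0,
          pvRank D.1 D.2 m av[0] * n + ((0 : Nat) : Int) ≤ pvRank D.1 D.2 m y.2 * n + y.1 := by
        intro y hy
        obtain ⟨k, hk, rfl⟩ := (PySem.List.mem_enumerate_iff av 0 y).mp hy
        simp only [zero_add]
        rw [hrankall av[0] (List.getElem_mem h0), hrankall av[k] (List.getElem_mem hk)]
        refine key_le hn0 (Or.inr ⟨rfl, ?_⟩) (by rw [hn]; exact_mod_cast h0) (Int.natCast_nonneg _)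
        exact_mod_cast Nat.zero_le k
      rw [hminlem 0 h0 hmin]
      rw [show PySem.List.pyGet? av 0 = av[(0 : Nat)]? from PySem.List.pyGet?_natCast av 0]
      rw [List.getElem?_eq_getElem h0]

-- ===== VERDICT (by name: the statement is the Claim_ definition above) =====
theorem pick_lang_py_spec : Claim_equal_pick_lang_py := by
  intro av pref _
  unfold Spec_pick_lang_py
  exact pick_eq av pref
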